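-- pv_equiv track=rewrite | github.com/FernandoMV1/University | MOQ exam.py | trouver_pairs
-- ===== SOURCE A (Python) =====
-- def trouver_pairs(no_telephones):
--     l = []
--     for pers1, num1 in no_telephones.items():
--         for pers2, num2 in no_telephones.items():
--             if num1 == num2:
--                     if pers1 != pers2:
--                         if [pers1, pers2] not in l:
--                             if [pers2, pers1] not in l:
--                                 l.append([pers1,pers2])
--     return l
-- ===== SOURCE B (Python) =====
-- def trouver_pairs(no_telephones):
--     groups = {}
--     for pers, num in no_telephones.items():
--         groups.setdefault(num, []).append(pers)
--     seen = {}
--     pairs = []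
--     for pers, num in no_telephones.items():
--         k = seen.get(num, 0) + 1
--         seen[num] = k
--         for other in groups[num][k:]:
--             pairs.append([pers, other])
--     return pairs
-- ===== Notes on version B (the rewrite author's own statement) =====
-- stated objective: faster
-- what changed: B groups people by phone number in one dict pass and emits each person's pairs by slicing the later members of its group, replacing A's full n-by-n double loop with two linear membership scans of the output list per candidate pair.
import Mathlib
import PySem

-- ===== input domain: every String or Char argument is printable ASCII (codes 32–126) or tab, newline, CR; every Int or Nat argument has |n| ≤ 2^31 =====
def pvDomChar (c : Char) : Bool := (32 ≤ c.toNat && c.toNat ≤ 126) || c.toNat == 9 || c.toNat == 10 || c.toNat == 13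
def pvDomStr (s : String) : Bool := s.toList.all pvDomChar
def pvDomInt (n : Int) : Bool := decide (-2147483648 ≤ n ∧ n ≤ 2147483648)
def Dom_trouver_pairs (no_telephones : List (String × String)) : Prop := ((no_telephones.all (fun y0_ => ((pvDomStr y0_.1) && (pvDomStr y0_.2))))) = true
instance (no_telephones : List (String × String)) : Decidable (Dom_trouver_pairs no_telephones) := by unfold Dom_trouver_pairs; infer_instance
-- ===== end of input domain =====

-- B groups people by number via a dict built in one pass and emits each person's pairs from the tail of its group; asymptotically faster than A's double scan with membership-list dedup.

-- ===== PORT A =====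
-- inner-loop body of A: the four nested ifs, in A's order
def pvInnerStep (x : String × String) (l : List (List String)) (y : String × String) : List (List String) :=
  if x.2 == y.2 then
    if x.1 != y.1 then
      if !(l.contains [x.1, y.1]) then
        if !(l.contains [y.1, x.1]) then l ++ [[x.1, y.1]] else l
      else l
    else l
  else l

def trouver_pairs (no_telephones : List (String × String)) : List (List String) :=
  no_telephones.foldl (fun l x => no_telephones.foldl (pvInnerStep x) l) []

-- ===== PORT B =====
def trouver_pairs_alt (no_telephones : List (String × String)) : List (List String) :=
  let groups : PySem.Dict String (List String) :=
    no_telephones.foldl (fun g x => g.modify x.2 [] (fun v => v ++ [x.1])) PySem.Dict.empty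
  (no_telephones.foldl (fun st x =>
      let k := st.1.getD x.2 0 + 1
      (st.1.insert x.2 k,
       st.2 ++ ((groups.getD x.2 []).drop k.toNat).map (fun q => [x.1, q])))
    ((PySem.Dict.empty : PySem.Dict String Int), ([] : List (List String)))).2

-- ===== PRECONDITION & SPEC =====
-- Pre_: the keys of a Python dict are pairwise distinct, so an association list with
-- duplicate first components represents no actual input of A; nothing A returns on is excluded.
def Pre_trouver_pairs (no_telephones : List (String × String)) : Prop :=
  (no_telephones.map Prod.fst).Nodup
instance (no_telephones : List (String × String)) : Decidable (Pre_trouver_pairs no_telephones) := by unfold Pre_trouver_pairs; infer_instance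
def pvWitness_trouver_pairs : (List (String × String)) := [("alice", "1"), ("bob", "2"), ("carol", "1")]

def Spec_trouver_pairs (no_telephones : List (String × String)) (out : List (List String)) : Prop := out = trouver_pairs_alt no_telephones
instance (no_telephones : List (String × String)) (out : List (List String)) : Decidable (Spec_trouver_pairs no_telephones out) := by unfold Spec_trouver_pairs; infer_instance

-- ===== CLAIM (what is proved, stated in full; the proofs are below) =====
def Claim_equal_trouver_pairs : Prop := ∀ (no_telephones : List (String × String)), Dom_trouver_pairs no_telephones → Pre_trouver_pairs no_telephones → Spec_trouver_pairs no_telephones (trouver_pairs no_telephones)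

-- ===== LEMMAS AND PROOFS =====

-- the common reference value: each person paired with the later members sharing its number
def pvEmit : List (String × String) → List (List String)
  | [] => []
  | x :: rest => ((rest.filter (fun q => q.2 == x.2)).map (fun q => [x.1, q.1])) ++ pvEmit rest

-- A's accumulator after the outer loop has processed p, with rest still to come
def pvEpart : List (String × String) → List (String × String) → List (List String)
  | [], _ => []
  | x :: p', rest => (((p' ++ rest).filter (fun q => q.2 == x.2)).map (fun q => [x.1, q.1])) ++ pvEpart p' rest

lemma pvEpart_nil (p : List (String × String)) : pvEpart p [] = pvEmit p := by
  induction p with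
  | nil => rfl
  | cons x p' ih => simp [pvEpart, pvEmit, ih]

lemma pvEpart_shift (p rest : List (String × String)) (x : String × String) :
    pvEpart (p ++ [x]) rest
      = pvEpart p (x :: rest) ++ ((rest.filter (fun q => q.2 == x.2)).map (fun q => [x.1, q.1])) := by
  induction p generalizing rest with
  | nil => simp [pvEpart]
  | cons y p' ih => simp [pvEpart, ih, List.append_assoc]

lemma pvMem_epart (p rest : List (String × String)) (y z : String × String)
    (hz : z ∈ rest) (hnum : y.2 = z.2) :
    y ∈ p → [y.1, z.1] ∈ pvEpart p rest := by
  induction p with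
  | nil => simp
  | cons a p' ih =>
    intro hy
    rcases List.mem_cons.mp hy with hy | hy
    · subst hy
      refine List.mem_append_left _ ?_
      exact List.mem_map.mpr ⟨z, List.mem_filter.mpr ⟨List.mem_append_right _ hz, by simp [hnum]⟩, rfl⟩
    · exact List.mem_append_right _ (ih hy)

lemma pvFirsts_epart (p rest : List (String × String)) (e : List String) :
    e ∈ pvEpart p rest → ∃ a ∈ p, ∃ b, e = [a.1, b] := by
  induction p with
  | nil => simp [pvEpart]
  | cons a p' ih =>
    intro he
    rcases List.mem_append.mp he with h | h
    · obtain ⟨q, _, rfl⟩ := List.mem_map.mp h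
      exact ⟨a, by simp, q.1, rfl⟩
    · obtain ⟨c, hc, b, hb⟩ := ih h
      exact ⟨c, by simp [hc], b, hb⟩

-- passing over already-processed people leaves l unchanged
lemma pvInner_prefix (x : String × String) (p : List (String × String)) (l : List (List String))
    (h : ∀ y ∈ p, y.2 = x.2 → [y.1, x.1] ∈ l ∨ [x.1, y.1] ∈ l ∨ y.1 = x.1) :
    p.foldl (pvInnerStep x) l = l := by
  induction p with
  | nil => rfl
  | cons y p' ih =>
    have hy := h y (by simp)
    have hstep : pvInnerStep x l y = l := by
      unfold pvInnerStep
      by_cases hnum : x.2 = y.2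
      · rcases hy hnum.symm with hm | hm | hm
        · simp [hnum, hm]
        · simp [hnum, hm]
        · simp [hnum, hm]
      · simp [hnum]
    rw [List.foldl_cons, hstep]
    exact ih (fun y hy' => h y (by simp [hy']))

-- passing over the not-yet-processed people appends exactly the filtered block
lemma pvInner_suffix (x : String × String) (rest : List (String × String)) (l : List (List String))
    (h1 : ∀ z ∈ rest, z.1 ≠ x.1)
    (h2 : ∀ z ∈ rest, [z.1, x.1] ∉ l)
    (h3 : ∀ z ∈ rest, [x.1, z.1] ∉ l)
    (h4 : (rest.map Prod.fst).Nodup) :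
    rest.foldl (pvInnerStep x) l = l ++ ((rest.filter (fun q => q.2 == x.2)).map (fun q => [x.1, q.1])) := by
  induction rest generalizing l with
  | nil => simp
  | cons z r ih =>
    have hz1 : z.1 ≠ x.1 := h1 z (by simp)
    by_cases hnum : x.2 = z.2
    · have hstep : pvInnerStep x l z = l ++ [[x.1, z.1]] := by
        unfold pvInnerStep
        simp [hnum, Ne.symm hz1, h2 z (by simp), h3 z (by simp)]
      rw [List.foldl_cons, hstep]
      have h4' : (z.1 :: r.map Prod.fst).Nodup := by simpa using h4
      have hznr : z.1 ∉ r.map Prod.fst := (List.nodup_cons.mp h4').1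
      rw [ih (l ++ [[x.1, z.1]])
        (fun w hw => h1 w (by simp [hw]))
        (fun w hw => by
          simp only [List.mem_append, List.mem_singleton]
          rintro (hc | hc)
          · exact h2 w (by simp [hw]) hc
          · injection hc with he1 he2
            injection he2 with he2 _
            exact hz1 he2.symm)
        (fun w hw => by
          simp only [List.mem_append, List.mem_singleton]
          rintro (hc | hc)
          · exact h3 w (by simp [hw]) hc
          · injection hc with _ he
            injection he with he _
            exact hznr (he ▸ List.mem_map_of_mem hw)
        )
        (by simpa using (List.nodup_cons.mp h4').2)]
      simp [hnum, List.append_assoc]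
    · have hstep : pvInnerStep x l z = l := by unfold pvInnerStep; simp [hnum]
      rw [List.foldl_cons, hstep,
        ih l (fun w hw => h1 w (by simp [hw])) (fun w hw => h2 w (by simp [hw]))
          (fun w hw => h3 w (by simp [hw]))
          (by simpa using (List.nodup_cons.mp (show (z.1 :: r.map Prod.fst).Nodup by simpa using h4)).2)]
      simp [Ne.symm hnum]

lemma pvInner_eq (p rest : List (String × String)) (x : String × String)
    (hnd : ((p ++ x :: rest).map Prod.fst).Nodup) :
    (p ++ x :: rest).foldl (pvInnerStep x) (pvEpart p (x :: rest))
      = pvEpart p (x :: rest) ++ ((rest.filter (fun q => q.2 == x.2)).map (fun q => [x.1, q.1])) := by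
  have hnd' : ((p.map Prod.fst) ++ (x.1 :: rest.map Prod.fst)).Nodup := by simpa using hnd
  obtain ⟨hndp, hndxr, hdisj⟩ := List.nodup_append.mp hnd'
  have hxr : x.1 ∉ rest.map Prod.fst := (List.nodup_cons.mp hndxr).1
  have hkeyp_not : ∀ a ∈ p.map Prod.fst, a ∉ x.1 :: rest.map Prod.fst := by
    intro a ha hb; exact (hdisj a ha a hb) rfl
  rw [List.foldl_append, List.foldl_cons]
  rw [pvInner_prefix x p (pvEpart p (x :: rest))
    (fun y hy hnum => Or.inl (pvMem_epart p (x :: rest) y x (by simp) hnum hy))]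
  have hself : pvInnerStep x (pvEpart p (x :: rest)) x = pvEpart p (x :: rest) := by
    simp [pvInnerStep]
  rw [hself]
  refine pvInner_suffix x rest (pvEpart p (x :: rest)) ?_ ?_ ?_ (List.nodup_cons.mp hndxr).2
  · intro z hz he
    exact hxr (he ▸ List.mem_map_of_mem hz)
  · intro z hz hm
    obtain ⟨a, hap, b, hab⟩ := pvFirsts_epart p (x :: rest) _ hm
    have hz1 : z.1 = a.1 := by injection hab with h _
    have : a.1 ∉ x.1 :: rest.map Prod.fst := hkeyp_not a.1 (List.mem_map_of_mem hap)
    exact this (by simp [← hz1, List.mem_map_of_mem hz])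
  · intro z hz hm
    obtain ⟨a, hap, b, hab⟩ := pvFirsts_epart p (x :: rest) _ hm
    have hx1 : x.1 = a.1 := by injection hab with h _
    have : a.1 ∉ x.1 :: rest.map Prod.fst := hkeyp_not a.1 (List.mem_map_of_mem hap)
    exact this (by simp [← hx1])

lemma pvOuter (rest p : List (String × String))
    (hnd : ((p ++ rest).map Prod.fst).Nodup) :
    rest.foldl (fun l x => (p ++ rest).foldl (pvInnerStep x) l) (pvEpart p rest)
      = pvEpart (p ++ rest) [] := by
  induction rest generalizing p with
  | nil => simp
  | cons x rest' ih =>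
    rw [List.foldl_cons, pvInner_eq p rest' x hnd, ← pvEpart_shift]
    have hxs : (p ++ [x]) ++ rest' = p ++ x :: rest' := by simp
    have := ih (p ++ [x]) (by rw [hxs]; exact hnd)
    rw [hxs] at this
    exact this

lemma pvA_eq_emit (xs : List (String × String)) (hnd : (xs.map Prod.fst).Nodup) :
    trouver_pairs xs = pvEmit xs := by
  have h := pvOuter xs [] (by simpa using hnd)
  simpa [trouver_pairs, pvEpart, pvEpart_nil] using h

-- ===== B side =====

lemma pvGroups_getD (xs : List (String × String)) (n : String) :
    ((xs.foldl (fun g x => g.modify x.2 [] (fun v => v ++ [x.1])) PySem.Dict.empty).getD n [])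
      = (xs.filter (fun q => q.2 == n)).map Prod.fst := by
  have hfold : (xs.foldl (fun g x => g.modify x.2 [] (fun v => v ++ [x.1])) (PySem.Dict.empty : PySem.Dict String (List String)))
      = (xs.map (fun x => (x.2, x.1))).foldl (fun d p => d.modify p.1 [] (fun v => v ++ [p.2])) PySem.Dict.empty := by
    rw [List.foldl_map]
  rw [hfold, PySem.Dict.getD_foldl_modify_append]
  simp [PySem.Dict.getD_empty, List.filter_map, List.map_map, Function.comp_def]

lemma pvB_loop (xs : List (String × String)) :
    ∀ (rest p : List (String × String)) (seen : PySem.Dict String Int) (acc : List (List String)), xs = p ++ rest →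
    (∀ n : String, seen.getD n 0 = ((p.filter (fun q : String × String => q.2 == n)).length : Int)) →
    (rest.foldl (fun st x =>
        let k := st.1.getD x.2 0 + 1
        (st.1.insert x.2 k,
         st.2 ++ ((((xs.foldl (fun g x => g.modify x.2 [] (fun v => v ++ [x.1])) PySem.Dict.empty).getD x.2 []).drop k.toNat).map (fun q => [x.1, q]))))
      (seen, acc)).2 = acc ++ pvEmit rest := by
  intro rest
  induction rest with
  | nil => intro p seen acc _ _; simp [pvEmit]
  | cons x rest' ih =>
    intro p seen acc hxs hseen
    rw [List.foldl_cons]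
    have hk : seen.getD x.2 0 + 1 = ((p.filter (fun q : String × String => q.2 == x.2)).length : Int) + 1 := by
      rw [hseen]
    have hkt : (seen.getD x.2 0 + 1).toNat = (p.filter (fun q : String × String => q.2 == x.2)).length + 1 := by
      rw [hk]; omega
    have hgr : ((xs.foldl (fun g x => g.modify x.2 [] (fun v => v ++ [x.1])) PySem.Dict.empty).getD x.2 [])
        = (p.filter (fun q => q.2 == x.2)).map Prod.fst ++ x.1 :: (rest'.filter (fun q => q.2 == x.2)).map Prod.fst := by
      rw [pvGroups_getD, hxs]
      simp [List.filter_append]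
    have hdrop : (((xs.foldl (fun g x => g.modify x.2 [] (fun v => v ++ [x.1])) PySem.Dict.empty).getD x.2 []).drop
          ((seen.getD x.2 0 + 1).toNat))
        = (rest'.filter (fun q => q.2 == x.2)).map Prod.fst := by
      rw [hgr, hkt]
      have : (p.filter (fun q : String × String => q.2 == x.2)).map Prod.fst ++ x.1 :: (rest'.filter (fun q => q.2 == x.2)).map Prod.fst
          = ((p.filter (fun q : String × String => q.2 == x.2)).map Prod.fst ++ [x.1]) ++ (rest'.filter (fun q => q.2 == x.2)).map Prod.fst := by
        simp
      rw [this]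
      have hlen : (p.filter (fun q : String × String => q.2 == x.2)).length + 1
          = ((p.filter (fun q : String × String => q.2 == x.2)).map Prod.fst ++ [x.1]).length := by simp
      rw [hlen, List.drop_left]
    have hseen' : ∀ n : String, (seen.insert x.2 (seen.getD x.2 0 + 1)).getD n 0
        = (((p ++ [x]).filter (fun q : String × String => q.2 == n)).length : Int) := by
      intro n
      rw [PySem.Dict.getD_insert]
      by_cases hn : n = x.2
      · subst hn
        rw [if_pos rfl, hseen]
        simp [List.filter_append]
      · rw [if_neg hn, hseen]
        have : (x.2 == n) = false := by simp [Ne.symm hn]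
        simp [List.filter_append, this]
    have := ih (p ++ [x]) (seen.insert x.2 (seen.getD x.2 0 + 1))
      (acc ++ (((((xs.foldl (fun g x => g.modify x.2 [] (fun v => v ++ [x.1])) PySem.Dict.empty).getD x.2 []).drop
          ((seen.getD x.2 0 + 1).toNat))).map (fun q => [x.1, q])))
      (by rw [hxs]; simp) hseen'
    rw [this, hdrop]
    simp [pvEmit, List.map_map, Function.comp_def, List.append_assoc]

lemma pvB_eq_emit (xs : List (String × String)) : trouver_pairs_alt xs = pvEmit xs := by
  have h := pvB_loop xs xs [] PySem.Dict.empty [] rfl (by intro n; simp [PySem.Dict.getD_empty])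
  simpa [trouver_pairs_alt] using h

-- ===== VERDICT (by name: the statement is the Claim_ definition above) =====
theorem trouver_pairs_spec : Claim_equal_trouver_pairs := by
  intro xs _ hpre
  unfold Spec_trouver_pairs
  rw [pvA_eq_emit xs hpre, pvB_eq_emit xs]
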